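-- pv_equiv track=rewrite | github.com/palaugur/BlackJack | Blackjack_functions.py | format_card_view
-- ===== SOURCE A (Python) =====
-- def format_card_view(card_list, hasHidden):
--     text = ""
--     for element in card_list:
--         if not hasHidden:
--             text += f"|{element[0]}-{element[1]}|\t"
--         if hasHidden:
--             text = f"|{element[0]}-{element[1]}|\t |Hidden|"
--
--     return text
-- ===== SOURCE B (Python) =====
-- def format_card_view(card_list, hasHidden):
--     if hasHidden:
--         if not card_list:
--             return ""
--         element = card_list[-1]
--         return f"|{element[0]}-{element[1]}|\t |Hidden|"
--     return "".join(f"|{e[0]}-{e[1]}|\t" for e in card_list)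
-- ===== Notes on version B (the rewrite author's own statement) =====
-- stated objective: simpler
-- what changed: The hasHidden test is lifted out of the loop: the hidden mode reads only the last card directly (A's loop overwrites text each iteration, so only the last element survives) and the visible mode is a single join over the list, so the accumulator loop disappears.
import Mathlib
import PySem

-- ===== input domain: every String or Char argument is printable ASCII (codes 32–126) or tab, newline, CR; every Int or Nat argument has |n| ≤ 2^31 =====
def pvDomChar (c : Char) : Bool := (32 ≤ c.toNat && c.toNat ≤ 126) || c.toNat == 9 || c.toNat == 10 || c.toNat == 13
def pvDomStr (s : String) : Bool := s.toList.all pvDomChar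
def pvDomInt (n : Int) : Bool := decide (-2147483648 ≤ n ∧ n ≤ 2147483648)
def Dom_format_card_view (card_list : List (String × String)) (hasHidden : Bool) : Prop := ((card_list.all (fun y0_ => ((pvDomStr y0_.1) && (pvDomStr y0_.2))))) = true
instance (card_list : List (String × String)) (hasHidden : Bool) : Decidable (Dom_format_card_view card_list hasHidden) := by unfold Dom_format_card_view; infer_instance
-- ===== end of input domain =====

-- B lifts the hasHidden test out of A's accumulator loop: the hidden mode reads only the
-- last card (in A the hidden branch overwrites text each iteration, so only the last card
-- survives) and the visible mode is a single join over the list. Objective: simpler.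

-- ===== PORT A =====
def format_card_view (card_list : List (String × String)) (hasHidden : Bool) : String :=
  card_list.foldl (fun text element =>
    let text := if !hasHidden then text ++ ("|" ++ element.1 ++ "-" ++ element.2 ++ "|\t") else text
    let text := if hasHidden then "|" ++ element.1 ++ "-" ++ element.2 ++ "|\t |Hidden|" else text
    text) ""

-- ===== PORT B =====
def format_card_view_alt (card_list : List (String × String)) (hasHidden : Bool) : String :=
  if hasHidden then
    match card_list.getLast? with
    | none => ""
    | some element => "|" ++ element.1 ++ "-" ++ element.2 ++ "|\t |Hidden|"
  else
    PySem.Str.join "" (card_list.map (fun e => "|" ++ e.1 ++ "-" ++ e.2 ++ "|\t"))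

-- ===== PRECONDITION & SPEC =====
def Spec_format_card_view (card_list : List (String × String)) (hasHidden : Bool) (out : String) : Prop := out = format_card_view_alt card_list hasHidden
instance (card_list : List (String × String)) (hasHidden : Bool) (out : String) : Decidable (Spec_format_card_view card_list hasHidden out) := by unfold Spec_format_card_view; infer_instance

-- ===== CLAIM (what is proved, stated in full; the proofs are below) =====
def Claim_equal_format_card_view : Prop := ∀ (card_list : List (String × String)) (hasHidden : Bool), Dom_format_card_view card_list hasHidden → Spec_format_card_view card_list hasHidden (format_card_view card_list hasHidden)

-- ===== LEMMAS AND PROOFS =====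

-- A's hidden branch ignores the accumulator: the fold returns g of the last element.
theorem foldl_last_fcv {α β : Type} (g : α → β) (l : List α) (acc : β) :
    l.foldl (fun _ e => g e) acc = l.getLast?.elim acc g := by
  induction l generalizing acc with
  | nil => rfl
  | cons a t ih =>
      cases t with
      | nil => rfl
      | cons b r =>
          rw [List.getLast?_cons_cons]
          exact ih (g a)

theorem join_empty_cons_fcv (x : String) (xs : List String) :
    PySem.Str.join "" (x :: xs) = x ++ PySem.Str.join "" xs := by
  apply String.toList_inj.mp
  cases xs <;>
    simp [PySem.Str.toList_join, PySem.Chars.join_singleton, PySem.Chars.join_cons_cons,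
      PySem.Chars.join_nil]

-- A's visible branch is a plain accumulator append.
theorem foldl_append_join_fcv (f : (String × String) → String) (l : List (String × String))
    (acc : String) :
    l.foldl (fun t e => t ++ f e) acc = acc ++ PySem.Str.join "" (l.map f) := by
  induction l generalizing acc with
  | nil => simp [PySem.Str.join, PySem.Chars.join_nil, String.append_empty]
  | cons a t ih =>
      simp only [List.foldl, List.map, join_empty_cons_fcv, ih (acc ++ f a),
        String.append_assoc]

-- ===== VERDICT (by name: the statement is the Claim_ definition above) =====
theorem format_card_view_spec : Claim_equal_format_card_view := by
  intro card_list hasHidden _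
  unfold Spec_format_card_view format_card_view format_card_view_alt
  cases hasHidden with
  | false =>
      simpa using foldl_append_join_fcv (fun e => "|" ++ e.1 ++ "-" ++ e.2 ++ "|\t") card_list ""
  | true =>
      have h := foldl_last_fcv (fun e : String × String => "|" ++ e.1 ++ "-" ++ e.2 ++ "|\t |Hidden|") card_list ""
      cases hl : card_list.getLast? <;> rw [hl] at h <;> simpa using h
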